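-- pv_equiv track=rewrite | github.com/jiajunma/unipotentrepn | standalone.py | compute_tail_signature
-- ===== SOURCE A (Python) =====
-- def getz(seq, idx, default=None):
--     """Safe index access."""
--     try:
--         return seq[idx]
--     except (IndexError, KeyError):
--         return default
--
-- def compute_tail_signature(drc, rtype):
--     """
--     Compute the tail signature (p_τt, q_τt) for ★ ∈ {B, D}.
--
--     The tail τ_t consists of the cells in the "extra" columns of the
--     longer diagram beyond the shorter diagram.
--
--     For B type: tail = cells in Q's first column beyond P's first column.
--     For D type: tail = cells in P's first column beyond Q's first column.
--
--     The tail signature sums per-cell contributions to (p, q):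
--       '*': (1, 1), 'r': (2, 0), 's': (0, 2), 'c': (1, 1), 'd': (1, 1)
--
--     Reference: [BMSZ] Lemma 11.3, equation (11.10).
--     """
--     drcL, drcR = drc
--     c1_iota = len(getz(drcL, 0, ''))
--     c1_j = len(getz(drcR, 0, ''))
--
--     # Per-cell contribution to (p, q)
--     _CELL_CONTRIB = {'*': (1, 1), 'r': (2, 0), 's': (0, 2), 'c': (1, 1), 'd': (1, 1)}
--
--     p_tail, q_tail = 0, 0
--
--     if rtype in ('B', 'B+', 'B-'):
--         # Tail is in Q (right diagram), rows c₁(ι) to c₁(j)-1 (0-indexed)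
--         first_col_Q = getz(drcR, 0, '')
--         for row in range(c1_iota, c1_j):
--             sym = first_col_Q[row] if row < len(first_col_Q) else '*'
--             dp, dq = _CELL_CONTRIB.get(sym, (1, 1))
--             p_tail += dp
--             q_tail += dq
--     elif rtype == 'D':
--         # Tail is in P (left diagram), rows c₁(j) to c₁(ι)-1 (0-indexed)
--         first_col_P = getz(drcL, 0, '')
--         for row in range(c1_j, c1_iota):
--             sym = first_col_P[row] if row < len(first_col_P) else '*'
--             dp, dq = _CELL_CONTRIB.get(sym, (1, 1))
--             p_tail += dp
--             q_tail += dq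
--
--     return (p_tail, q_tail)
-- ===== SOURCE B (Python) =====
-- def _tail_sig(seg):
--     n = len(seg)
--     r = seg.count('r')
--     s = seg.count('s')
--     return (n + r - s, n - r + s)
--
-- def compute_tail_signature(drc, rtype):
--     """Closed-form tail signature: every cell contributes (1,1) except
--     'r' -> (2,0) and 's' -> (0,2), so over the tail slice of length n,
--     p = n + #r - #s and q = n - #r + #s."""
--     drcL, drcR = drc
--     p0 = drcL[0] if drcL else ''
--     q0 = drcR[0] if drcR else ''
--     if rtype in ('B', 'B+', 'B-'):
--         return _tail_sig(q0[len(p0):])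
--     elif rtype == 'D':
--         return _tail_sig(p0[len(q0):])
--     return (0, 0)
-- ===== Notes on version B (the rewrite author's own statement) =====
-- stated objective: simpler
-- what changed: Replaces the per-row loop with per-cell dictionary lookups by a closed form: take the tail slice of the relevant first column and return (n + count('r') - count('s'), n - count('r') + count('s')), since every symbol other than 'r'/'s' contributes (1,1).
import Mathlib
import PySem

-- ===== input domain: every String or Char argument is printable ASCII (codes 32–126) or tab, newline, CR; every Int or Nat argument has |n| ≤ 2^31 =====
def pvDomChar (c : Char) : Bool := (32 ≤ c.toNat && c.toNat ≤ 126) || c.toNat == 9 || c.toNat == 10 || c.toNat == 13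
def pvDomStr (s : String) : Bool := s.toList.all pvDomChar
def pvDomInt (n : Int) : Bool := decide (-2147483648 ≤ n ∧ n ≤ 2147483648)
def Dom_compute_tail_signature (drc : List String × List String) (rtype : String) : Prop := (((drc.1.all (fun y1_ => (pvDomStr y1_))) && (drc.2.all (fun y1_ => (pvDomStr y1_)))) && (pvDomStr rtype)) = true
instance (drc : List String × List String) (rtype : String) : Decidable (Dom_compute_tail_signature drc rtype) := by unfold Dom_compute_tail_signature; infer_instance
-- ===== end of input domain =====

-- B replaces A's per-row loop with dict lookups by a closed form over the tail slice:
-- p = n + #r - #s, q = n - #r + #s (objective: simpler).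


-- ===== PORT A =====
-- _CELL_CONTRIB
def ctsContrib : PySem.Dict Char (Int × Int) :=
  ⟨[('*', (1, 1)), ('r', (2, 0)), ('s', (0, 2)), ('c', (1, 1)), ('d', (1, 1))]⟩

def compute_tail_signature (drc : List String × List String) (rtype : String) : Int × Int :=
  let drcL := drc.1
  let drcR := drc.2
  let c1_iota : Int := PySem.Str.len (PySem.List.pyGetD drcL 0 "")
  let c1_j : Int := PySem.Str.len (PySem.List.pyGetD drcR 0 "")
  if rtype = "B" ∨ rtype = "B+" ∨ rtype = "B-" then
    let first_col_Q := PySem.List.pyGetD drcR 0 ""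
    (PySem.List.pyRange c1_iota c1_j).foldl
      (fun pq row =>
        -- first_col_Q[row]: guarded by row < len, so the .getD '*' default is unreachable (totalizer only)
        let sym : Char := if row < PySem.Str.len first_col_Q
          then (PySem.Str.pyGet? first_col_Q row).getD '*' else '*'
        let d := ctsContrib.getD sym (1, 1)
        (pq.1 + d.1, pq.2 + d.2)) (0, 0)
  else if rtype = "D" then
    let first_col_P := PySem.List.pyGetD drcL 0 ""
    (PySem.List.pyRange c1_j c1_iota).foldl
      (fun pq row =>
        let sym : Char := if row < PySem.Str.len first_col_P
          then (PySem.Str.pyGet? first_col_P row).getD '*' else '*'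
        let d := ctsContrib.getD sym (1, 1)
        (pq.1 + d.1, pq.2 + d.2)) (0, 0)
  else (0, 0)

-- ===== PORT B =====
def tailSig (seg : String) : Int × Int :=
  let n : Int := PySem.Str.len seg
  let r : Int := PySem.Str.count seg "r"
  let s : Int := PySem.Str.count seg "s"
  (n + r - s, n - r + s)

def compute_tail_signature_alt (drc : List String × List String) (rtype : String) : Int × Int :=
  let p0 : String := match drc.1 with | [] => "" | x :: _ => x
  let q0 : String := match drc.2 with | [] => "" | x :: _ => x
  if rtype = "B" ∨ rtype = "B+" ∨ rtype = "B-" then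
    tailSig (PySem.Str.slice q0 (some (PySem.Str.len p0)) none)
  else if rtype = "D" then
    tailSig (PySem.Str.slice p0 (some (PySem.Str.len q0)) none)
  else (0, 0)

-- ===== PRECONDITION & SPEC =====
def Spec_compute_tail_signature (drc : List String × List String) (rtype : String) (out : Int × Int) : Prop := out = compute_tail_signature_alt drc rtype
instance (drc : List String × List String) (rtype : String) (out : Int × Int) : Decidable (Spec_compute_tail_signature drc rtype out) := by unfold Spec_compute_tail_signature; infer_instance

-- ===== CLAIM (what is proved, stated in full; the proofs are below) =====
def Claim_equal_compute_tail_signature : Prop := ∀ (drc : List String × List String) (rtype : String), Dom_compute_tail_signature drc rtype → Spec_compute_tail_signature drc rtype (compute_tail_signature drc rtype)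

-- ===== LEMMAS AND PROOFS =====

-- the per-cell contribution as a case split
lemma contrib_cases (c : Char) :
    ctsContrib.getD c (1, 1) =
      if c = 'r' then ((2 : Int), (0 : Int)) else if c = 's' then (0, 2) else (1, 1) := by
  have e : ∀ x : Char, ¬ c = x → (x == c) = false := by
    intro x hx
    simp only [beq_eq_false_iff_ne]
    exact fun h => hx h.symm
  by_cases h1 : c = 'r'
  · subst h1; decide
  · by_cases h2 : c = 's'
    · subst h2; decide
    · rw [if_neg h1, if_neg h2]
      by_cases h3 : c = '*'
      · subst h3; decide
      · by_cases h4 : c = 'c'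
        · subst h4; decide
        · by_cases h5 : c = 'd'
          · subst h5; decide
          · simp [ctsContrib, PySem.Dict.getD, PySem.Dict.get?, List.find?,
              e _ h1, e _ h2, e _ h3, e _ h4, e _ h5]

-- A's indexed loop over pyRange a len(q) equals a fold over the dropped suffix
lemma loopA_eq_drop (q : List Char) (a : Nat) (acc : Int × Int) :
    (PySem.List.pyRange (a : Int) (q.length : Int)).foldl
      (fun pq row =>
        let sym : Char := if row < (q.length : Int)
          then (PySem.List.pyGet? q row).getD '*' else '*'
        let d := ctsContrib.getD sym (1, 1)
        (pq.1 + d.1, pq.2 + d.2)) acc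
    = (q.drop a).foldl
      (fun pq sym =>
        let d := ctsContrib.getD sym (1, 1)
        (pq.1 + d.1, pq.2 + d.2)) acc := by
  by_cases hb : a < q.length
  · rw [PySem.List.pyRange_one_cons (by exact_mod_cast hb)]
    have hdrop : q.drop a = q[a] :: q.drop (a + 1) := List.drop_eq_getElem_cons hb
    rw [hdrop]
    simp only [List.foldl_cons]
    have hsym : (if (a : Int) < (q.length : Int)
        then (PySem.List.pyGet? q ((a : Nat) : Int)).getD '*' else '*') = q[a] := by
      rw [if_pos (by exact_mod_cast hb), PySem.List.pyGet?_natCast,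
        List.getElem?_eq_getElem hb]
      rfl
    rw [hsym]
    have hstep : ((a : Int) + 1) = ((a + 1 : Nat) : Int) := by push_cast; ring
    rw [hstep]
    exact loopA_eq_drop q (a + 1) _
  · have h1 : PySem.List.pyRange (a : Int) (q.length : Int) = [] := by
      simp [PySem.List.pyRange,
        show ¬((a : Int) < (q.length : Int)) from by exact_mod_cast hb]
    have h2 : q.drop a = [] := List.drop_eq_nil_of_le (by omega)
    rw [h1, h2]
    rfl
termination_by q.length - a

-- the fold computes the closed form
lemma fold_closed (l : List Char) (acc : Int × Int) :
    l.foldl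
      (fun pq sym =>
        let d := ctsContrib.getD sym (1, 1)
        (pq.1 + d.1, pq.2 + d.2)) acc
    = (acc.1 + l.length + l.count 'r' - l.count 's',
       acc.2 + l.length - l.count 'r' + l.count 's') := by
  induction l generalizing acc with
  | nil => simp
  | cons h t ih =>
    simp only [List.foldl, ih, contrib_cases h, List.count_cons]
    by_cases h1 : h = 'r' <;> by_cases h2 : h = 's' <;>
      simp_all <;> constructor <;> omega

-- single-character Python str.count is List.count
lemma count_go_single (c : Char) : ∀ (fuel : Nat) (l : List Char) (acc : Nat),
    l.length ≤ fuel → PySem.Chars.count.go [c] fuel l acc = acc + l.count c := by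
  intro fuel
  induction fuel with
  | zero => intro l acc h; cases l <;> simp_all [PySem.Chars.count.go]
  | succ n ih =>
    intro l acc h
    cases l with
    | nil => simp [PySem.Chars.count.go]
    | cons x t =>
      simp only [PySem.Chars.count.go, List.isPrefixOf, List.count_cons]
      by_cases hx : x = c
      · subst hx
        simp only [BEq.rfl, Bool.true_and, if_true, List.length_cons, List.length_nil,
          List.drop_succ_cons, List.drop_zero]
        rw [ih t (acc + 1) (by simpa using Nat.le_of_succ_le_succ h)]
        omega
      · have hc : (c == x && true) = false := by
          simp only [Bool.and_true, beq_eq_false_iff_ne]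
          exact fun hcx => hx hcx.symm
        have hxc : (x == c) = false := beq_eq_false_iff_ne.mpr hx
        simp only [hc, Bool.false_eq_true, if_false, hxc, Nat.add_zero]
        exact ih t acc (by simpa using Nat.le_of_succ_le_succ h)

lemma chars_count_single (l : List Char) (c : Char) :
    PySem.Chars.count l [c] = l.count c := by
  simpa [PySem.Chars.count] using count_go_single c l.length l 0 le_rfl

-- head-or-empty equals pyGetD _ 0 ""
lemma head_eq_pyGetD (xs : List String) :
    (match xs with | [] => "" | x :: _ => x) = PySem.List.pyGetD xs 0 "" := by
  cases xs <;> simp [PySem.List.pyGetD, PySem.List.pyGet?, PySem.List.pyIdx?]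

-- one branch: the loop equals tailSig of the tail slice
lemma branch_eq (p0 q0 : String) :
    (PySem.List.pyRange (PySem.Str.len p0) (PySem.Str.len q0)).foldl
      (fun pq row =>
        let sym : Char := if row < PySem.Str.len q0
          then (PySem.Str.pyGet? q0 row).getD '*' else '*'
        let d := ctsContrib.getD sym (1, 1)
        (pq.1 + d.1, pq.2 + d.2)) (0, 0)
    = tailSig (PySem.Str.slice q0 (some (PySem.Str.len p0)) none) := by
  have hA := loopA_eq_drop q0.toList p0.toList.length (0, 0)
  have hseg : (PySem.Str.slice q0 (some ((p0.toList.length : Nat) : Int)) none).toList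
      = q0.toList.drop p0.toList.length := by
    rw [PySem.Str.toList_slice, PySem.Chars.slice_eq_listSlice,
        PySem.List.slice_from_natCast]
  simp only [PySem.Str.len_eq, PySem.Str.pyGet?_eq, PySem.Chars.pyGet?_eq_listPyGet?]
  rw [hA, fold_closed]
  simp only [tailSig, PySem.Str.count_eq, PySem.Str.len_eq, hseg]
  have hr : ("r" : String).toList = ['r'] := rfl
  have hs : ("s" : String).toList = ['s'] := rfl
  rw [hr, hs, chars_count_single, chars_count_single]
  norm_num

-- ===== VERDICT (by name: the statement is the Claim_ definition above) =====
theorem compute_tail_signature_spec : Claim_equal_compute_tail_signature := by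
  intro drc rtype _
  unfold Spec_compute_tail_signature compute_tail_signature compute_tail_signature_alt
  simp only [head_eq_pyGetD]
  by_cases hB : rtype = "B" ∨ rtype = "B+" ∨ rtype = "B-"
  · simp only [if_pos hB]
    exact branch_eq _ _
  · simp only [if_neg hB]
    by_cases hD : rtype = "D"
    · simp only [if_pos hD]
      exact branch_eq _ _
    · simp [if_neg hD]
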